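-- pv_equiv track=rewrite | github.com/taewookimmr/Programmers-Problems | 2017_tipstown/delete.py | solution
-- ===== SOURCE A (Python) =====
-- def solution(s):
--     stack = []
--     for c in s:
--         if len(stack):
--             if stack[-1] == c :
--                 stack.pop()
--             else :
--                 stack.append(c)
--         else :
--             stack.append(c)
--     if len(stack):
--         return False
--     else :
--         return True
-- ===== SOURCE B (Python) =====
-- def _pass(chars):
--     out = []
--     changed = False
--     i = 0
--     n = len(chars)
--     while i < n:
--         if i + 1 < n and chars[i] == chars[i + 1]:
--             i += 2
--             changed = True
--         else:
--             out.append(chars[i])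
--             i += 1
--     return out, changed
--
--
-- def solution(s):
--     cur = list(s)
--     changed = True
--     while changed:
--         cur, changed = _pass(cur)
--     return not cur
-- ===== Notes on version B (the rewrite author's own statement) =====
-- stated objective: alternative
-- what changed: Replaces the stack-cancellation fold with a repeated left-to-right scan that deletes adjacent equal pairs until a pass makes no change, then tests emptiness (correct by confluence of adjacent-pair deletion).
import Mathlib
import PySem

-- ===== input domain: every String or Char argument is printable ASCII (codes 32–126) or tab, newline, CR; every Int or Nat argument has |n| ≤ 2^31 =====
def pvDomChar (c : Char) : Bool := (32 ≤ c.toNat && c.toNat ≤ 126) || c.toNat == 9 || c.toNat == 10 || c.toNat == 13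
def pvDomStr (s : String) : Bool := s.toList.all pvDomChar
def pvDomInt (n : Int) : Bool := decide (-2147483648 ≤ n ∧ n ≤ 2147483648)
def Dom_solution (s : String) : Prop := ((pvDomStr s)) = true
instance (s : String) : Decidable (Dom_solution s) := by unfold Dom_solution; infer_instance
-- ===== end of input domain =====

-- B replaces A's stack fold by repeated scans deleting adjacent equal pairs until stable; same verdict.

-- ===== PORT A =====
-- one step of A's loop body: check stack, compare top, pop or append
def stackStep (stack : List Char) (c : Char) : List Char :=
  if stack.length ≠ 0 then
    if stack.getLast? = some c then stack.dropLast else stack ++ [c]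
  else stack ++ [c]

def solution (s : String) : Bool :=
  let stack := s.toList.foldl stackStep []
  if stack.length ≠ 0 then false else true

-- ===== PORT B =====
-- one pass of B's inner while loop: scan left to right, dropping adjacent equal pairs;
-- returns the rebuilt list and whether anything was dropped
def passB : List Char → List Char × Bool
  | [] => ([], false)
  | [a] => ([a], false)
  | a :: b :: t =>
    if a = b then ((passB t).1, true)
    else (a :: (passB (b :: t)).1, (passB (b :: t)).2)

-- the pass never lengthens the list, and shortens it whenever it reports a change
theorem passB_len : ∀ l : List Char,
    (passB l).1.length ≤ l.length ∧ ((passB l).2 = true → (passB l).1.length < l.length) := by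
  intro l
  induction l using passB.induct with
  | case1 => simp [passB]
  | case2 a => simp [passB]
  | case3 b t ih =>
    simp only [passB, if_true]
    have := ih.1
    constructor
    · simp; omega
    · intro _; simp; omega
  | case4 a b t h ih =>
    simp only [passB, if_neg h]
    refine ⟨by simpa using Nat.succ_le_succ ih.1, fun hc => ?_⟩
    have := ih.2 (by simpa using hc)
    simpa using Nat.succ_lt_succ this

-- B's outer while loop: repeat the pass while it changed something
def goB (l : List Char) : List Char :=
  if (passB l).2 then goB (passB l).1 else (passB l).1
termination_by l.length
decreasing_by exact (passB_len l).2 (by assumption)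

def solution_alt (s : String) : Bool :=
  let cur := goB s.toList
  cur.isEmpty

-- ===== PRECONDITION & SPEC =====
def Spec_solution (s : String) (out : Bool) : Prop := out = solution_alt s
instance (s : String) (out : Bool) : Decidable (Spec_solution s out) := by unfold Spec_solution; infer_instance

-- ===== CLAIM (what is proved, stated in full; the proofs are below) =====
def Claim_equal_solution : Prop := ∀ (s : String), Dom_solution s → Spec_solution s (solution s)


-- ===== LEMMAS AND PROOFS =====

-- the stack never holds two equal adjacent characters
def noAdj (l : List Char) : Prop := List.IsChain (· ≠ ·) l

theorem noAdj_step (st : List Char) (c : Char) (h : noAdj st) : noAdj (stackStep st c) := by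
  unfold stackStep noAdj at *
  split
  · split
    · exact h.prefix (List.dropLast_prefix st)
    · rename_i hne hlast
      rw [List.isChain_append]
      refine ⟨h, by simp, ?_⟩
      intro x hx y hy
      simp at hy; subst hy
      intro hxy; subst hxy
      exact hlast (by simpa using hx)
  · rename_i hlen
    have : st = [] := by simpa using hlen
    subst this; simp

-- pushing a character twice onto a clean stack is the identity
theorem step_step (st : List Char) (a : Char) (h : noAdj st) : stackStep (stackStep st a) a = st := by
  rcases List.eq_nil_or_concat st with rfl | ⟨t, x, rfl⟩
  · simp [stackStep]
  · simp only [List.concat_eq_append] at h ⊢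
    by_cases hx : x = a
    · have h1 : stackStep (t ++ [x]) a = t := by
        simp [stackStep, hx]
      rw [h1]
      rcases List.eq_nil_or_concat t with rfl | ⟨u, y, rfl⟩
      · simp [stackStep, hx]
      · simp only [List.concat_eq_append] at h ⊢
        have hy : y ≠ a := by
          unfold noAdj at h
          rw [List.append_assoc, List.isChain_append] at h
          have := h.2.1
          simp only [List.singleton_append] at this
          exact hx ▸ (List.isChain_cons_cons.mp this).1
        simp [stackStep, hy, hx]
    · have h1 : stackStep (t ++ [x]) a = (t ++ [x]) ++ [a] := by
        simp [stackStep, hx]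
      rw [h1]
      simp [stackStep]

-- one pass of B does not change what A's fold computes (from any clean stack)
theorem fold_passB (l : List Char) : ∀ st : List Char, noAdj st →
    List.foldl stackStep st (passB l).1 = List.foldl stackStep st l := by
  induction l using passB.induct with
  | case1 => intro st _; simp [passB]
  | case2 a => intro st _; simp [passB]
  | case3 b t ih =>
    intro st hst
    simp only [passB, if_true]
    rw [ih st hst]
    simp only [List.foldl_cons]
    rw [step_step st b hst]
  | case4 a b t h ih =>
    intro st hst
    simp only [passB, if_neg h, List.foldl_cons]
    exact ih (stackStep st a) (noAdj_step st a hst)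

-- a pass that reports no change returns its input unchanged, and that input is clean
theorem passB_false : ∀ l : List Char, (passB l).2 = false → (passB l).1 = l ∧ noAdj l := by
  intro l
  induction l using passB.induct with
  | case1 => intro _; exact ⟨rfl, by simp [noAdj]⟩
  | case2 a => intro _; exact ⟨rfl, by simp [noAdj]⟩
  | case3 b t ih => simp [passB]
  | case4 a b t h ih =>
    intro hc
    simp only [passB, if_neg h] at hc ⊢
    obtain ⟨h1, h2⟩ := ih hc
    refine ⟨by rw [h1], ?_⟩
    unfold noAdj at *
    rw [List.isChain_cons_cons]
    exact ⟨h, h2⟩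

-- B's loop result is clean and preserves A's fold
theorem goB_spec (l : List Char) :
    noAdj (goB l) ∧ List.foldl stackStep [] (goB l) = List.foldl stackStep [] l := by
  induction l using goB.induct with
  | case1 l hc ih =>
    rw [goB, if_pos hc]
    obtain ⟨h1, h2⟩ := ih
    exact ⟨h1, by rw [h2, fold_passB l [] (by simp [noAdj])]⟩
  | case2 l hc =>
    rw [goB, if_neg hc]
    obtain ⟨h1, h2⟩ := passB_false l (by simpa using hc)
    rw [h1]
    exact ⟨h2, rfl⟩

-- A's fold over a clean word from a compatible stack just appends it
theorem fold_noAdj : ∀ (l st : List Char), noAdj (st ++ l) →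
    List.foldl stackStep st l = st ++ l := by
  intro l
  induction l with
  | nil => intro st _; simp
  | cons c t ih =>
    intro st h
    rcases List.eq_nil_or_concat st with rfl | ⟨u, x, rfl⟩
    · have hstep : stackStep [] c = [c] := by simp [stackStep]
      simp only [List.foldl_cons, hstep]
      simpa using ih [c] (by simpa using h)
    · simp only [List.concat_eq_append] at h ⊢
      have hx : x ≠ c := by
        unfold noAdj at h
        rw [List.append_assoc, List.isChain_append] at h
        have := h.2.1
        simp only [List.singleton_append] at this
        exact (List.isChain_cons_cons.mp this).1
      have hstep : stackStep (u ++ [x]) c = (u ++ [x]) ++ [c] := by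
        simp [stackStep, hx]
      simp only [List.foldl_cons, hstep]
      have := ih ((u ++ [x]) ++ [c]) (by simpa using h)
      rw [this]; simp

-- ===== VERDICT (by name: the statement is the Claim_ definition above) =====
theorem solution_spec : Claim_equal_solution := by
  intro s _
  unfold Spec_solution solution solution_alt
  obtain ⟨h1, h2⟩ := goB_spec s.toList
  have hfold : List.foldl stackStep [] s.toList = goB s.toList := by
    rw [← h2, fold_noAdj (goB s.toList) [] (by simpa using h1)]
    simp
  simp only [hfold]
  cases goB s.toList <;> simp
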